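-- pv_equiv track=rewrite | github.com/AndrewKozyrev/PYTHON | Enigma_Machine.py | rotor2
-- ===== SOURCE A (Python) =====
-- def rotor2(num=0):
--     l_port = [1, 2, 3, 4]
--
--     while num > 0:
--         ##### rotating a rotor
--         temp = l_port.pop(0)
--         l_port.append(temp)
--         #####
--         num -= 1
--
--     l = {'A': l_port[0], 'B': l_port[1], 'C': l_port[2], 'D': l_port[3]}     ## mapping letter --> port
--     r = ['A', 'B', 'C', 'D']      ## right port
--
--     ##### mapping left port ---> right port
--     d = {1: l_port.index(1), 2: (l_port.index(2) + 1) % 4, 3: l_port.index(3) - 1, 4: l_port.index(4)}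
--     #####
--
--     rotor = {'A': r[d[l['A']]], 'B': r[d[l['B']]], 'C': r[d[l['C']]], 'D': r[d[l['D']]]}
--     return rotor
-- ===== SOURCE B (Python) =====
-- # Closed-form: the rotor wiring only depends on num mod 4 (no rotation for num <= 0),
-- # so look the answer up in a precomputed table instead of simulating num rotations.
-- _ROTOR2_TABLE = [
--     {'A': 'A', 'B': 'C', 'C': 'B', 'D': 'D'},
--     {'A': 'B', 'B': 'A', 'C': 'C', 'D': 'D'},
--     {'A': 'D', 'B': 'B', 'C': 'C', 'D': 'A'},
--     {'A': 'A', 'B': 'B', 'C': 'D', 'D': 'C'},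
-- ]
--
-- def rotor2(num=0):
--     k = num % 4 if num > 0 else 0
--     return dict(_ROTOR2_TABLE[k])
-- ===== Notes on version B (the rewrite author's own statement) =====
-- stated objective: faster
-- what changed: B replaces the O(num) rotation loop and the index/dict reconstruction by a single lookup in a precomputed four-entry table indexed by the rotation count modulo four (zero when the count is non-positive).
import Mathlib
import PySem

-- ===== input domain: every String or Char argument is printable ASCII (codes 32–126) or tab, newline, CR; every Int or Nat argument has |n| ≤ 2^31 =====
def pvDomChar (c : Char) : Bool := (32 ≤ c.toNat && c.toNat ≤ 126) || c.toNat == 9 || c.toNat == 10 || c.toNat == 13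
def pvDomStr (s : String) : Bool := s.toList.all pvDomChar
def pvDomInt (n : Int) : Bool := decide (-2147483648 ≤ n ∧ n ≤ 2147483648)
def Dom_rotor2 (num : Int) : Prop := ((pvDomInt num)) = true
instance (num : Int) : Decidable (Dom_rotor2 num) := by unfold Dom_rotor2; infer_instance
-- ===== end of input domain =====

-- B replaces A's O(num) rotation loop + index/dict reconstruction by an O(1)
-- lookup in a precomputed 4-entry table indexed by num % 4 (0 for num <= 0).

-- ===== PORT A =====
-- the 'while num > 0' loop body: temp = l_port.pop(0); l_port.append(temp)
-- (the [] branch is unreachable: l_port starts as [1,2,3,4] and keeps its length)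
def rotor2Loop : Nat → List Int → List Int
  | 0, l => l
  | n + 1, l => rotor2Loop n (match l with | [] => [] | x :: xs => xs ++ [x])

def rotor2 (num : Int) : List (String × String) :=
  let l_port := rotor2Loop num.toNat [1, 2, 3, 4]
  -- l_port.index(v); the value is always present, so index never raises (getD 0 unreachable)
  let ix : Int → Int := fun v => (((PySem.List.index? l_port v).getD 0 : Nat) : Int)
  let l : PySem.Dict String Int := PySem.Dict.ofList
    [("A", PySem.List.pyGetD l_port 0 0), ("B", PySem.List.pyGetD l_port 1 0),
     ("C", PySem.List.pyGetD l_port 2 0), ("D", PySem.List.pyGetD l_port 3 0)]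
  let r : List String := ["A", "B", "C", "D"]
  let d : PySem.Dict Int Int := PySem.Dict.ofList
    [(1, ix 1), (2, PySem.Int.mod (ix 2 + 1) 4), (3, ix 3 - 1), (4, ix 4)]
  -- r[d[l[k]]]; d[3] can be -1, pyGetD indexes from the end like Python
  let look : String → String :=
    fun k => PySem.List.pyGetD r (PySem.Dict.getD d (PySem.Dict.getD l k 0) 0) ""
  [("A", look "A"), ("B", look "B"), ("C", look "C"), ("D", look "D")]

-- ===== PORT B =====
def rotor2Table : List (List (String × String)) :=
  [[("A", "A"), ("B", "C"), ("C", "B"), ("D", "D")],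
   [("A", "B"), ("B", "A"), ("C", "C"), ("D", "D")],
   [("A", "D"), ("B", "B"), ("C", "C"), ("D", "A")],
   [("A", "A"), ("B", "B"), ("C", "D"), ("D", "C")]]

def rotor2_alt (num : Int) : List (String × String) :=
  let k : Int := if num > 0 then PySem.Int.mod num 4 else 0
  PySem.List.pyGetD rotor2Table k []

-- ===== PRECONDITION & SPEC =====
def Spec_rotor2 (num : Int) (out : List (String × String)) : Prop := out = rotor2_alt num
instance (num : Int) (out : List (String × String)) : Decidable (Spec_rotor2 num out) := by unfold Spec_rotor2; infer_instance

-- ===== CLAIM (what is proved, stated in full; the proofs are below) =====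
def Claim_equal_rotor2 : Prop := ∀ (num : Int), Dom_rotor2 num → Spec_rotor2 num (rotor2 num)

-- ===== LEMMAS AND PROOFS =====

-- four rotations return any 4-element list to itself
lemma rotor2Loop_add_four (n : Nat) (a b c d : Int) :
    rotor2Loop (n + 4) [a, b, c, d] = rotor2Loop n [a, b, c, d] := by
  simp [rotor2Loop]

-- the loop result only depends on the fuel mod 4
lemma rotor2Loop_mod (n : Nat) :
    rotor2Loop n [1, 2, 3, 4] = rotor2Loop (n % 4) [1, 2, 3, 4] := by
  induction n using Nat.strong_induction_on with
  | _ n ih =>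
    by_cases h : n < 4
    · rw [Nat.mod_eq_of_lt h]
    · obtain ⟨m, rfl⟩ : ∃ m, n = m + 4 := ⟨n - 4, by omega⟩
      rw [rotor2Loop_add_four, ih m (by omega), Nat.add_mod_right]

theorem rotor2_spec : Claim_equal_rotor2 := by
  intro num _
  unfold Spec_rotor2 rotor2 rotor2_alt
  by_cases h : num > 0
  · have hnn : num = (num.toNat : Int) := (Int.toNat_of_nonneg h.le).symm
    have hmod : PySem.Int.mod num 4 = ((num.toNat % 4 : Nat) : Int) := by
      rw [PySem.Int.mod_eq_emod_of_pos (by norm_num : (0:Int) < 4), hnn]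
      exact_mod_cast rfl
    rw [if_pos h, hmod, rotor2Loop_mod]
    have h4 : num.toNat % 4 < 4 := Nat.mod_lt _ (by norm_num)
    interval_cases (num.toNat % 4) <;> decide
  · have h0 : num.toNat = 0 := Int.toNat_of_nonpos (by omega)
    rw [if_neg h, h0]
    decide
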